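-- pv_equiv track=rewrite | github.com/enricotomasi/GeeksforGeeks_problems | Easy/Woodall Number.py | isWoodall
-- ===== SOURCE A (Python) =====
-- def isWoodall(N):
--     # code here
--     woo = 0
--     cnt = 1
--
--     while woo < N:
--         woo = cnt * pow(2, cnt) -1
--         if N == woo:
--             return 1
--         cnt += 1
--
--     return 0
-- ===== SOURCE B (Python) =====
-- def isWoodall(N):
--     # Binary search for cnt with cnt*2**cnt - 1 == N instead of a linear upward scan.
--     if N < 1:
--         return 0
--     lo, hi = 1, N.bit_length() + 1
--     while lo <= hi:
--         mid = (lo + hi) // 2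
--         w = mid * pow(2, mid) - 1
--         if w == N:
--             return 1
--         if w < N:
--             lo = mid + 1
--         else:
--             hi = mid - 1
--     return 0
-- ===== Notes on version B (the rewrite author's own statement) =====
-- stated objective: alternative
-- what changed: Replaces A's upward linear scan over the Woodall index cnt with a binary search for cnt between one and the bit length of N plus one, using the strict monotonicity of the Woodall function.
import Mathlib
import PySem

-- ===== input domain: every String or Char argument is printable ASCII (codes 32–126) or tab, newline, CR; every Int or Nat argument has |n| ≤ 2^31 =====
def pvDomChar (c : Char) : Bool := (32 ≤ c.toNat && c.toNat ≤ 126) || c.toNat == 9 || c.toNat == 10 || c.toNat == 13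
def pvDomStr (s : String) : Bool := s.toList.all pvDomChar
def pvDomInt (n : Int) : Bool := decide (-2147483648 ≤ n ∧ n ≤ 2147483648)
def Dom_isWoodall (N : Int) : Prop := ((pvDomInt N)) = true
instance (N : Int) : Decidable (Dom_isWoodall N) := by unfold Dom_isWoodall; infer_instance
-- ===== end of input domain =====

-- B replaces A's upward linear scan over cnt by a binary search for cnt in [1, N.bit_length()+1]
-- (alternative decomposition; no speed claim).

-- ===== PORT A =====
-- termination helper, cited by woodLoopA's decreasing_by: once N < cnt the freshly computed woo is ≥ N
theorem pvWooGe (N cnt : Int) (h : N < cnt) : N ≤ cnt * 2 ^ cnt.toNat - 1 := by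
  by_cases h1 : 1 ≤ cnt
  · have h2 : (2 : Int) ≤ 2 ^ cnt.toNat := by
      calc (2 : Int) = 2 ^ 1 := by norm_num
      _ ≤ 2 ^ cnt.toNat := by apply pow_le_pow_right₀ (by norm_num); omega
    nlinarith
  · have hz : cnt.toNat = 0 := by omega
    simp [hz]; omega

-- A's while loop; (woo, cnt) is the loop state.  pow(2, cnt) is ported as 2 ^ cnt.toNat,
-- exact here since cnt ≥ 1 on every reachable call.
def woodLoopA (N woo cnt : Int) : Int :=
  if woo < N then
    let woo' := cnt * 2 ^ cnt.toNat - 1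
    if N = woo' then 1
    else woodLoopA N woo' (cnt + 1)
  else 0
termination_by (N + 1 - cnt).toNat + (if woo < N then 1 else 0)
decreasing_by
  have h := pvWooGe N cnt
  split <;> rename_i hw <;> omega

def isWoodall (N : Int) : Int := woodLoopA N 0 1

-- ===== PORT B =====
-- B's while loop: binary search for cnt over [lo, hi]
def woodSearchB (N lo hi : Int) : Int :=
  if lo ≤ hi then
    let mid := PySem.Int.floordiv (lo + hi) 2
    let w := mid * 2 ^ mid.toNat - 1
    if w = N then 1
    else if w < N then woodSearchB N (mid + 1) hi
    else woodSearchB N lo (mid - 1)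
  else 0
termination_by (hi + 1 - lo).toNat
decreasing_by
  all_goals
    have h := PySem.Int.floordiv_two_mid_bounds (lo := lo) (hi := hi) (by omega)
    omega

def isWoodall_alt (N : Int) : Int :=
  if N < 1 then 0
  else woodSearchB N 1 ((PySem.Int.bitLength N : Int) + 1)

-- ===== PRECONDITION & SPEC =====
def Spec_isWoodall (N : Int) (out : Int) : Prop := out = isWoodall_alt N
instance (N : Int) (out : Int) : Decidable (Spec_isWoodall N out) := by unfold Spec_isWoodall; infer_instance

-- ===== CLAIM (what is proved, stated in full; the proofs are below) =====
def Claim_equal_isWoodall : Prop := ∀ (N : Int), Dom_isWoodall N → Spec_isWoodall N (isWoodall N)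

-- ===== LEMMAS AND PROOFS =====

-- strict monotonicity of f c := c * 2^c - 1 on c ≥ 1
theorem pvF_mono (c d : Int) (hc : 1 ≤ c) (hcd : c < d) :
    c * 2 ^ c.toNat - 1 < d * 2 ^ d.toNat - 1 := by
  have hp : (2:Int) ^ c.toNat ≤ 2 ^ d.toNat := by
    apply pow_le_pow_right₀ (by norm_num); omega
  have hpos : (0:Int) < 2 ^ c.toNat := by positivity
  nlinarith

theorem pvF_mono_le (c d : Int) (hc : 1 ≤ c) (hcd : c ≤ d) :
    c * 2 ^ c.toNat - 1 ≤ d * 2 ^ d.toNat - 1 := by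
  rcases eq_or_lt_of_le hcd with rfl | h
  · exact le_refl _
  · exact le_of_lt (pvF_mono c d hc h)

-- any Woodall index of N is at most bitLength N + 1
theorem pvF_bound (N c : Int) (hN : 1 ≤ N) (hc : 1 ≤ c)
    (hf : c * 2 ^ c.toNat - 1 = N) : c ≤ (PySem.Int.bitLength N : Int) + 1 := by
  by_contra hgt
  push Not at hgt
  set s : Nat := PySem.Int.bitLength N with hs
  have hlt : N.natAbs < 2 ^ s := PySem.Int.lt_two_pow_bitLength N
  have hNlt : N < (2:Int) ^ s := by
    have h1 : (N.natAbs : Int) < ((2 ^ s : Nat) : Int) := by exact_mod_cast hlt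
    have h2 : N ≤ (N.natAbs : Int) := Int.le_natAbs
    have h3 : ((2 ^ s : Nat) : Int) = (2:Int) ^ s := by push_cast; ring
    omega
  have hs1 : ((s:Int) + 1).toNat = s + 1 := by omega
  have hmono := pvF_mono ((s:Int) + 1) c (by omega) hgt
  rw [hs1, hf] at hmono
  have hpow : (2:Int) ^ (s+1) = 2 * 2 ^ s := by ring
  have hge : (2:Int) ^ (s+1) - 1 ≤ ((s:Int)+1) * 2 ^ (s+1) - 1 := by
    have hpos : (0:Int) < 2 ^ (s+1) := by positivity
    nlinarith [Int.natCast_nonneg s]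
  omega

-- A's loop returns 1 when some index ≥ cnt matches (k bounds c₀ - cnt)
theorem pvLoopA_one (N : Int) : ∀ k : Nat, ∀ woo cnt c₀ : Int, (c₀ - cnt).toNat ≤ k →
    1 ≤ cnt → cnt ≤ c₀ → c₀ * 2 ^ c₀.toNat - 1 = N → woo < N → woodLoopA N woo cnt = 1 := by
  intro k
  induction k with
  | zero =>
    intro woo cnt c₀ hk h1 hle hf hw
    have : cnt = c₀ := by omega
    subst this
    rw [woodLoopA, if_pos hw, if_pos hf.symm]
  | succ k ih =>
    intro woo cnt c₀ hk h1 hle hf hw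
    rw [woodLoopA, if_pos hw]
    by_cases hm : N = cnt * 2 ^ cnt.toNat - 1
    · rw [if_pos hm]
    · rw [if_neg hm]
      have hne : cnt ≠ c₀ := fun h => hm (by rw [h, hf])
      have hw' : cnt * 2 ^ cnt.toNat - 1 < N := by
        have := pvF_mono cnt c₀ h1 (by omega)
        omega
      exact ih _ (cnt + 1) c₀ (by omega) (by omega) (by omega) hf hw'

-- A's loop returns 0 when no index ≥ cnt matches (k bounds the termination measure)
theorem pvLoopA_zero (N : Int) : ∀ k : Nat, ∀ woo cnt : Int,
    (N + 1 - cnt).toNat + (if woo < N then 1 else 0) ≤ k → 1 ≤ cnt →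
    (∀ c : Int, cnt ≤ c → c * 2 ^ c.toNat - 1 ≠ N) → woodLoopA N woo cnt = 0 := by
  intro k
  induction k with
  | zero =>
    intro woo cnt hk h1 hH
    have hw : ¬ woo < N := by split at hk <;> omega
    rw [woodLoopA, if_neg hw]
  | succ k ih =>
    intro woo cnt hk h1 hH
    by_cases hw : woo < N
    · rw [woodLoopA, if_pos hw, if_neg (fun h => hH cnt le_rfl h.symm)]
      have hdec := pvWooGe N cnt
      refine ih _ (cnt + 1) ?_ (by omega) (fun c hc => hH c (by omega))
      split <;> rename_i hw2 <;> simp only [if_pos hw] at hk <;> omega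
    · rw [woodLoopA, if_neg hw]

-- B's search returns 1 when a matching index lies in [lo, hi]
theorem pvSearchB_one (N : Int) : ∀ k : Nat, ∀ lo hi c₀ : Int, (hi + 1 - lo).toNat ≤ k →
    1 ≤ lo → lo ≤ c₀ → c₀ ≤ hi → c₀ * 2 ^ c₀.toNat - 1 = N → woodSearchB N lo hi = 1 := by
  intro k
  induction k with
  | zero => intro lo hi c₀ hk h1 hl hr hf; omega
  | succ k ih =>
    intro lo hi c₀ hk h1 hl hr hf
    have hlh : lo ≤ hi := by omega
    rw [woodSearchB, if_pos hlh]
    have hmid := PySem.Int.floordiv_two_mid_bounds (lo := lo) (hi := hi) hlh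
    set mid := PySem.Int.floordiv (lo + hi) 2 with hmd
    by_cases he : mid * 2 ^ mid.toNat - 1 = N
    · rw [if_pos he]
    · rw [if_neg he]
      by_cases hlt : mid * 2 ^ mid.toNat - 1 < N
      · rw [if_pos hlt]
        have hc : mid < c₀ := by
          by_contra hcc
          push Not at hcc
          have := pvF_mono_le c₀ mid (by omega) hcc
          omega
        exact ih (mid + 1) hi c₀ (by omega) (by omega) (by omega) hr hf
      · rw [if_neg hlt]
        have hc : c₀ < mid := by
          by_contra hcc
          push Not at hcc
          have := pvF_mono_le mid c₀ (by omega) hcc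
          omega
        exact ih lo (mid - 1) c₀ (by omega) h1 hl (by omega) hf

-- B's search returns 0 when no index ≥ 1 matches (lo ≥ 1 keeps mid ≥ 1)
theorem pvSearchB_zero (N : Int) : ∀ k : Nat, ∀ lo hi : Int, (hi + 1 - lo).toNat ≤ k →
    1 ≤ lo → (∀ c : Int, 1 ≤ c → c * 2 ^ c.toNat - 1 ≠ N) → woodSearchB N lo hi = 0 := by
  intro k
  induction k with
  | zero =>
    intro lo hi hk h1 hH
    rw [woodSearchB, if_neg (by omega)]
  | succ k ih =>
    intro lo hi hk h1 hH
    by_cases hlh : lo ≤ hi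
    · rw [woodSearchB, if_pos hlh]
      have hmid := PySem.Int.floordiv_two_mid_bounds (lo := lo) (hi := hi) hlh
      set mid := PySem.Int.floordiv (lo + hi) 2 with hmd
      rw [if_neg (hH mid (by omega))]
      by_cases hlt : mid * 2 ^ mid.toNat - 1 < N
      · rw [if_pos hlt]
        exact ih (mid + 1) hi (by omega) (by omega) hH
      · rw [if_neg hlt]
        exact ih lo (mid - 1) (by omega) h1 hH
    · rw [woodSearchB, if_neg hlh]

-- ===== VERDICT (by name: the statement is the Claim_ definition above) =====
theorem isWoodall_spec : Claim_equal_isWoodall := by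
  intro N _
  unfold Spec_isWoodall isWoodall isWoodall_alt
  by_cases hN : N < 1
  · rw [if_pos hN, woodLoopA, if_neg (by omega)]
  · rw [if_neg hN]
    push Not at hN
    by_cases hP : ∃ c : Int, 1 ≤ c ∧ c * 2 ^ c.toNat - 1 = N
    · obtain ⟨c₀, hc₀, hf⟩ := hP
      rw [pvLoopA_one N (c₀ - 1).toNat 0 1 c₀ (by omega) le_rfl (by omega) hf (by omega),
          pvSearchB_one N ((PySem.Int.bitLength N : Int) + 1).toNat 1 _ c₀ (by omega)
            le_rfl (by omega) (pvF_bound N c₀ hN (by omega) hf) hf]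
    · push Not at hP
      rw [pvLoopA_zero N (N.toNat + 1) 0 1
            (by rw [if_pos (show (0:Int) < N by omega)]; omega) le_rfl
            (fun c hc h => hP c (by omega) h),
          pvSearchB_zero N ((PySem.Int.bitLength N : Int) + 1).toNat 1 _ (by omega) le_rfl
            (fun c hc h => hP c hc h)]
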